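-- pv_equiv track=rewrite | github.com/boscopk/boscopk | PesoMesATV.py | MaiorPesoMes
-- ===== SOURCE A (Python) =====
-- def MaiorPesoMes(DiarioSaude, nome):
--     maiorPeso = ""
--     diaDoMes = 0
--     for i in range(len(DiarioSaude)):
--         if (DiarioSaude[i][1].upper() == nome.upper()):
--             if (maiorPeso == ""):
--                 maiorPeso = DiarioSaude[i][2]
--                 diaDoMes = DiarioSaude[i][0]
--             else:
--                 if (DiarioSaude[i][2] >= maiorPeso):
--                     maiorPeso = DiarioSaude[i][2]
--                     diaDoMes = diaDoMes = DiarioSaude[i][0]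
--                 else:
--                     pass
--
--     return diaDoMes
-- ===== SOURCE B (Python) =====
-- def MaiorPesoMes(DiarioSaude, nome):
--     alvo = nome.upper()
--     matches = [row for row in DiarioSaude if row[1].upper() == alvo]
--     if not matches:
--         return 0
--     mx = max(row[2] for row in matches)
--     return next(row[0] for row in reversed(matches) if row[2] == mx)
-- ===== Notes on version B (the rewrite author's own statement) =====
-- stated objective: simpler
-- what changed: replaces A's index loop with sentinel-string state by a filter of the matching rows, a max over their weight strings, and a reversed search for the last row attaining that max (preserving A's last-wins tie-break); the C-level comprehension/max/next passes also make it measurably faster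
import Mathlib
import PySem

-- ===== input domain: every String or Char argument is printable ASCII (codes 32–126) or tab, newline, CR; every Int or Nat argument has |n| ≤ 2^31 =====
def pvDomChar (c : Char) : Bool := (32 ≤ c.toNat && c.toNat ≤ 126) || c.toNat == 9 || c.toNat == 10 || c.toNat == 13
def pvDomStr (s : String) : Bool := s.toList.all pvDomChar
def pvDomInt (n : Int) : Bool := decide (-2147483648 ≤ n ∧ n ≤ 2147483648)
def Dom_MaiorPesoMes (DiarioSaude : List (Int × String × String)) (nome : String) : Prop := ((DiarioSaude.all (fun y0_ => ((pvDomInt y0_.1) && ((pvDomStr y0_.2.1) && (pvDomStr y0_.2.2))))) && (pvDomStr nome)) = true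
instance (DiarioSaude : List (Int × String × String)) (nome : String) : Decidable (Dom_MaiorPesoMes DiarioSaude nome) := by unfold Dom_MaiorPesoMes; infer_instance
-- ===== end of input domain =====

-- B replaces A's interleaved index loop (sentinel-string state) by filter + max + reversed
-- search for the last row attaining the max (same last-wins tie-break); objective: simpler.


-- ===== PORT A =====
-- literal transliteration of A: index loop over range(len), sentinel "" for maiorPeso,
-- `>=` on the weight STRINGS (Python string comparison = Lean's ≤ on String)
def MaiorPesoMes (DiarioSaude : List (Int × String × String)) (nome : String) : Int :=
  let st := (PySem.List.pyRange 0 (PySem.List.len DiarioSaude) 1).foldl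
    (fun (st : String × Int) i =>
      let row := PySem.List.pyGetD DiarioSaude i (0, "", "")
      if PySem.Str.upper row.2.1 = PySem.Str.upper nome then
        if st.1 = "" then (row.2.2, row.1)
        else if st.1 ≤ row.2.2 then (row.2.2, row.1)
        else st
      else st) ("", 0)
  st.2

-- ===== PORT B =====
-- transliteration of Source B: filter the matching rows, max of their weight strings,
-- then the first row of reversed(ms) whose weight equals that max
def MaiorPesoMes_alt (DiarioSaude : List (Int × String × String)) (nome : String) : Int :=
  let alvo := PySem.Str.upper nome
  let ms := DiarioSaude.filter (fun row => PySem.Str.upper row.2.1 == alvo)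
  if ms.isEmpty then 0
  else
    let mx := (PySem.List.max? (ms.map (fun row => row.2.2)) id).getD ""
    ((ms.reverse.find? (fun row => row.2.2 == mx)).map (fun row => row.1)).getD 0

-- ===== PRECONDITION & SPEC =====
def Spec_MaiorPesoMes (DiarioSaude : List (Int × String × String)) (nome : String) (out : Int) : Prop := out = MaiorPesoMes_alt DiarioSaude nome
instance (DiarioSaude : List (Int × String × String)) (nome : String) (out : Int) : Decidable (Spec_MaiorPesoMes DiarioSaude nome out) := by unfold Spec_MaiorPesoMes; infer_instance

-- ===== CLAIM (what is proved, stated in full; the proofs are below) =====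
def Claim_equal_MaiorPesoMes : Prop := ∀ (DiarioSaude : List (Int × String × String)) (nome : String), Dom_MaiorPesoMes DiarioSaude nome → Spec_MaiorPesoMes DiarioSaude nome (MaiorPesoMes DiarioSaude nome)

-- ===== LEMMAS AND PROOFS =====

-- A's inner update on a matching row, with the "" sentinel branch folded away
-- (valid because "" ≤ w for every string w)
def pvStep (st : String × Int) (row : Int × String × String) : String × Int :=
  if st.1 ≤ row.2.2 then (row.2.2, row.1) else st

theorem pvStep_eq (st : String × Int) (row : Int × String × String) :
    (if st.1 = "" then (row.2.2, row.1)
     else if st.1 ≤ row.2.2 then (row.2.2, row.1) else st) = pvStep st row := by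
  by_cases h : st.1 = "" <;> simp [pvStep, h]

-- the loop invariant: on a nonempty list, A's fold computes (max weight, day of the
-- LAST row attaining it), which is exactly what B's max + reversed find? select
theorem pvCore (m : List (Int × String × String)) (hm : m ≠ []) :
    ∃ (M : String) (x : Int × String × String),
      PySem.List.max? (m.map (fun r => r.2.2)) id = some M ∧
      m.reverse.find? (fun r => r.2.2 == M) = some x ∧
      m.foldl pvStep ("", 0) = (M, x.1) := by
  induction m using List.reverseRecOn with
  | nil => exact absurd rfl hm
  | append_singleton l s IH =>
    by_cases hl : l = []
    · subst hl
      refine ⟨s.2.2, s, ?_, ?_, ?_⟩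
      · simp [PySem.List.max?]
      · simp
      · simp [pvStep]
    · obtain ⟨M, x, hmax, hfind, hfold⟩ := IH hl
      simp only [PySem.List.max?] at hmax
      have hmax' : PySem.List.max? ((l ++ [s]).map (fun r => r.2.2)) id
          = if M < s.2.2 then some s.2.2 else some M := by
        simp only [PySem.List.max?, List.map_append, List.foldl_append, hmax]
        simp
      have hfold' : (l ++ [s]).foldl pvStep ("", 0) = pvStep (M, x.1) s := by
        rw [List.foldl_append, hfold]; rfl
      by_cases hle : M ≤ s.2.2
      · refine ⟨s.2.2, s, ?_, ?_, ?_⟩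
        · rcases lt_or_eq_of_le hle with h | h
          · rw [hmax']; simp [h]
          · rw [hmax']; simp [h]
        · simp
        · rw [hfold']; simp [pvStep, hle]
      · have hlt : s.2.2 < M := not_le.mp hle
        refine ⟨M, x, ?_, ?_, ?_⟩
        · rw [hmax']; simp [not_lt.mpr (le_of_lt hlt)]
        · have hne : (s.2.2 == M) = false := by
            simp [ne_of_lt hlt]
          simp [hne, hfind]
        · rw [hfold']; simp [pvStep, hle]

theorem MaiorPesoMes_eq_fold (DiarioSaude : List (Int × String × String)) (nome : String) :
    MaiorPesoMes DiarioSaude nome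
      = ((DiarioSaude.filter (fun row => PySem.Str.upper row.2.1 == PySem.Str.upper nome)).foldl
          pvStep ("", 0)).2 := by
  simp only [MaiorPesoMes]
  rw [show (PySem.List.pyRange 0 (PySem.List.len DiarioSaude) 1).foldl
        (fun (st : String × Int) i =>
          let row := PySem.List.pyGetD DiarioSaude i (0, "", "")
          if PySem.Str.upper row.2.1 = PySem.Str.upper nome then
            if st.1 = "" then (row.2.2, row.1)
            else if st.1 ≤ row.2.2 then (row.2.2, row.1)
            else st
          else st) ("", 0)
      = DiarioSaude.foldl (fun (st : String × Int) row =>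
          if PySem.Str.upper row.2.1 = PySem.Str.upper nome then
            if st.1 = "" then (row.2.2, row.1)
            else if st.1 ≤ row.2.2 then (row.2.2, row.1)
            else st
          else st) ("", 0)
      from by
        simpa using PySem.List.foldl_pyRange_pyGetD (xs := DiarioSaude)
          (f := fun (st : String × Int) row =>
            if PySem.Str.upper row.2.1 = PySem.Str.upper nome then
              if st.1 = "" then (row.2.2, row.1)
              else if st.1 ≤ row.2.2 then (row.2.2, row.1)
              else st
            else st)
          (d := (0, "", "")) (init := (("", 0) : String × Int)) (a := 0) (by norm_num)]
  rw [List.foldl_filter]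
  have hfg : (fun (st : String × Int) row =>
      if PySem.Str.upper row.2.1 = PySem.Str.upper nome then
        if st.1 = "" then (row.2.2, row.1)
        else if st.1 ≤ row.2.2 then (row.2.2, row.1)
        else st
      else st)
    = (fun (x : String × Int) y =>
        if (PySem.Str.upper y.2.1 == PySem.Str.upper nome) = true then pvStep x y else x) := by
    funext st row
    by_cases h : PySem.Str.upper row.2.1 = PySem.Str.upper nome
    · simp only [h, beq_self_eq_true, if_true]
      exact pvStep_eq st row
    · simp [h]
  rw [hfg]

-- ===== VERDICT (by name: the statement is the Claim_ definition above) =====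
theorem MaiorPesoMes_spec : Claim_equal_MaiorPesoMes := by
  intro DiarioSaude nome _
  unfold Spec_MaiorPesoMes
  simp only [MaiorPesoMes_alt]
  rw [MaiorPesoMes_eq_fold]
  set ms := DiarioSaude.filter (fun row => PySem.Str.upper row.2.1 == PySem.Str.upper nome) with hmdef
  by_cases hm : ms = []
  · simp [hm]
  · obtain ⟨M, x, hmax, hfind, hfold⟩ := pvCore ms hm
    simp only [List.isEmpty_iff, hm, hmax, Option.getD_some, hfind, hfold,
      Option.map_some]
    simp
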